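-- pv_equiv track=rewrite | github.com/socathie/CodeFights | Tournaments/adaNumber.py | adaNumber
-- ===== SOURCE A (Python) =====
-- def adaNumber(line):
--     atLeastOneDigit = False
--     if line[len(line) - 1] == '#':
--         i = 0
--         base = 0
--         while line[i] != '#' and base <= 16:
--             if line[i] != '_':
--                 if '0' <= line[i] and line[i] <= '9':
--                     base = base * 10 + ord(line[i]) - ord('0')
--                 else:
--                     return False
--             i += 1
--         if base < 2 or base > 16:
--             return False
--         i += 1
--         while i < len(line) - 1:
--             if line[i] != '_':
--                 digit = -1
--                 if 'a' <= line[i] and line[i] <= 'f':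
--                     digit = ord(line[i]) - ord('a') + 10
--                 if 'A' <= line[i] and line[i] <= 'F':
--                     digit = ord(line[i]) - ord('A') + 10
--                 if '0' <= line[i] and line[i] <= '9':
--                     digit = ord(line[i]) - ord('0')
--                 if 0 <= digit and digit < base:
--                     atLeastOneDigit = True
--                 else:
--                     return False
--             i += 1
--     else:
--         for i in range(len(line)):
--             if line[i] != '_':
--                 if '0' <= line[i] and line[i] <= '9':
--                     atLeastOneDigit = True
--                 else:
--                     return False
--     return atLeastOneDigit
-- ===== SOURCE B (Python) =====
-- _BASES = {'2': 2, '3': 3, '4': 4, '5': 5, '6': 6, '7': 7, '8': 8, '9': 9,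
--           '10': 10, '11': 11, '12': 12, '13': 13, '14': 14, '15': 15, '16': 16}
-- _LOWER = "0123456789abcdef"
-- _UPPER = "0123456789ABCDEF"
-- _DEC = set("_0123456789")
--
--
-- def adaNumber(line):
--     if line[len(line) - 1] != '#':
--         chars = set(line)
--         return chars <= _DEC and bool(chars - {'_'})
--     j = line.index('#')
--     head, body = line[:j], line[j + 1:-1]
--     if not set(head) <= _DEC:
--         return False
--     base = _BASES.get(head.replace('_', '').lstrip('0'))
--     if base is None:
--         return False
--     allowed = set(_LOWER[:base]) | set(_UPPER[:base]) | {'_'}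
--     chars = set(body)
--     return chars <= allowed and bool(chars - {'_'})
-- ===== Notes on version B (the rewrite author's own statement) =====
-- stated objective: alternative
-- what changed: Replaces A's index-threaded character scans (a base-accumulating while loop entangled with an early exit, and a cascade of range tests per digit) by loop-free set algebra: each part of the string is validated by set inclusion against a precomputed alphabet (head against the decimal alphabet, body against the base-length prefixes of the hex alphabets), and the base itself is obtained with no arithmetic at all, by looking the zero-stripped base string up in a 15-entry literal table of the canonical base spellings.
import Mathlib
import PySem

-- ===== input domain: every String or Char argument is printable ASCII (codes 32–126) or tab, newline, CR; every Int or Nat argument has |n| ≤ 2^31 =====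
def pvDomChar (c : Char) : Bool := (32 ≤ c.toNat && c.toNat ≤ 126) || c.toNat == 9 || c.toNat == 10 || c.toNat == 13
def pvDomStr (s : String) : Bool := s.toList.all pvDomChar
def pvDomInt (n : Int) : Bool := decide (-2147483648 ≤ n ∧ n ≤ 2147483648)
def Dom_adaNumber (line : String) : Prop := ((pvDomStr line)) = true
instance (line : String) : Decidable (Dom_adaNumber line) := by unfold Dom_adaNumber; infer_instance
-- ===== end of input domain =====

-- B replaces A's index-threaded character scans by loop-free set algebra (set inclusions against
-- precomputed alphabets) plus a literal base-string lookup table; same values, no speed claim.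

-- ===== PORT A =====
-- first while loop: consumes chars while current ≠ '#' and base ≤ 16; returns the
-- remaining suffix (current char first) and the accumulated base; none = return False
-- (a non-digit before the '#') or Python's IndexError when the scan runs off the end
-- (unreachable when '#' is in the string).
def aLoop1 : List Char → Int → Option (List Char × Int)
  | [], _ => none
  | c :: rest, base =>
    if c ≠ '#' ∧ base ≤ 16 then
      if c ≠ '_' then
        if '0' ≤ c ∧ c ≤ '9' then aLoop1 rest (base * 10 + ((c.toNat : Int) - 48))
        else none
      else aLoop1 rest base
    else some (c :: rest, base)

-- A's cascade of overwrites digit = -1; if 'a'<=..: ...; if 'A'<=..: ...; if '0'<=..: ...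
def aDigit (c : Char) : Int :=
  let d0 : Int := -1
  let d1 := if 'a' ≤ c ∧ c ≤ 'f' then (c.toNat : Int) - 97 + 10 else d0
  let d2 := if 'A' ≤ c ∧ c ≤ 'F' then (c.toNat : Int) - 65 + 10 else d1
  if '0' ≤ c ∧ c ≤ '9' then (c.toNat : Int) - 48 else d2

-- second while loop over the chars strictly between the first '#' and the last char
def aLoop2 : List Char → Int → Bool → Bool
  | [], _, acc => acc
  | c :: rest, base, acc =>
    if c ≠ '_' then
      if 0 ≤ aDigit c ∧ aDigit c < base then aLoop2 rest base true else false
    else aLoop2 rest base acc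

-- the else-branch for-loop over the whole string
def aLoop3 : List Char → Bool → Bool
  | [], acc => acc
  | c :: rest, acc =>
    if c ≠ '_' then
      if '0' ≤ c ∧ c ≤ '9' then aLoop3 rest true
      else false
    else aLoop3 rest acc

def adaNumber (line : String) : Bool :=
  match line.toList.getLast? with
  | none => false   -- Python raises IndexError on line[-1] of ""; excluded by Pre_
  | some last =>
    if last = '#' then
      match aLoop1 line.toList 0 with
      | none => false
      | some (suffix, base) =>
        if base < 2 ∨ 16 < base then false
        else aLoop2 ((suffix.drop 1).dropLast) base false
    else aLoop3 line.toList false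

-- ===== PORT B =====
-- _BASES = {'2': 2, ..., '16': 16}; string keys are represented by their character lists
-- (the whole port works on line.toList).
def bBases : PySem.Dict (List Char) Int :=
  ⟨[(['2'],2),(['3'],3),(['4'],4),(['5'],5),(['6'],6),(['7'],7),(['8'],8),(['9'],9),
    (['1','0'],10),(['1','1'],11),(['1','2'],12),(['1','3'],13),(['1','4'],14),(['1','5'],15),(['1','6'],16)]⟩

def bLower : List Char := ['0','1','2','3','4','5','6','7','8','9','a','b','c','d','e','f']
def bUpper : List Char := ['0','1','2','3','4','5','6','7','8','9','A','B','C','D','E','F']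
-- _DEC = set("_0123456789")
def bDec : PySem.Set Char := PySem.Set.ofList ['_','0','1','2','3','4','5','6','7','8','9']

def adaNumber_alt (line : String) : Bool :=
  match line.toList.getLast? with
  | none => false   -- Python raises IndexError on line[-1] of ""; excluded by Pre_
  | some last =>
    if last ≠ '#' then
      let chars := PySem.Set.ofList line.toList
      chars.issubset bDec && !(PySem.Set.diff chars (PySem.Set.ofList ['_'])).isEmpty
    else
      let cs := line.toList
      let head := cs.takeWhile (· ≠ '#')                        -- line[:line.index('#')]
      let body := ((cs.dropWhile (· ≠ '#')).drop 1).dropLast    -- line[line.index('#')+1:-1]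
      if ¬ ((PySem.Set.ofList head).issubset bDec = true) then false
      else
        match bBases.get? ((head.filter (· ≠ '_')).dropWhile (· == '0')) with
        | none => false
        | some base =>
          let allowed := PySem.Set.union (PySem.Set.union
              (PySem.Set.ofList (PySem.List.slice bLower none (some base)))
              (PySem.Set.ofList (PySem.List.slice bUpper none (some base))))
              (PySem.Set.ofList ['_'])
          let chars := PySem.Set.ofList body
          chars.issubset allowed && !(PySem.Set.diff chars (PySem.Set.ofList ['_'])).isEmpty

-- ===== PRECONDITION & SPEC =====
-- Pre_ excludes only the empty string, on which A raises IndexError (line[len(line)-1]).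
def Pre_adaNumber (line : String) : Prop := line ≠ ""
instance (line : String) : Decidable (Pre_adaNumber line) := by unfold Pre_adaNumber; infer_instance
def pvWitness_adaNumber : String := "16#fF#"

def Spec_adaNumber (line : String) (out : Bool) : Prop := out = adaNumber_alt line
instance (line : String) (out : Bool) : Decidable (Spec_adaNumber line out) := by unfold Spec_adaNumber; infer_instance

-- ===== CLAIM (what is proved, stated in full; the proofs are below) =====
def Claim_equal_adaNumber : Prop := ∀ (line : String), Dom_adaNumber line → Pre_adaNumber line → Spec_adaNumber line (adaNumber line)

-- ===== LEMMAS AND PROOFS =====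

lemma char_eq_iff (a b : Char) : a = b ↔ a.toNat = b.toNat :=
  ⟨fun h => h ▸ rfl, fun h => Char.ext (UInt32.toNat_inj.mp h)⟩

lemma char_eq_of_toNat (c d : Char) (h : c.toNat = d.toNat) : c = d := (char_eq_iff c d).mpr h

lemma char_le_iff (a b : Char) : a ≤ b ↔ a.toNat ≤ b.toNat := by
  rw [Char.le_def, UInt32.le_iff_toNat_le]; rfl

-- the accumulation step shared by A's first while loop (and used to state the table lemma)
def bf : Int → Char → Int := fun a c => a * 10 + ((c.toNat : Int) - 48)

lemma aDigit_iff (base : Int) (c : Char) :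
    (0 ≤ aDigit c ∧ aDigit c < base) ↔
      ((48 ≤ c.toNat ∧ c.toNat ≤ 57 ∧ (c.toNat : Int) - 48 < base) ∨
       (65 ≤ c.toNat ∧ c.toNat ≤ 70 ∧ (c.toNat : Int) - 55 < base) ∨
       (97 ≤ c.toNat ∧ c.toNat ≤ 102 ∧ (c.toNat : Int) - 87 < base)) := by
  unfold aDigit
  simp only [char_le_iff, show 'a'.toNat = 97 from rfl, show 'f'.toNat = 102 from rfl,
    show 'A'.toNat = 65 from rfl, show 'F'.toNat = 70 from rfl,
    show '0'.toNat = 48 from rfl, show '9'.toNat = 57 from rfl]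
  split_ifs <;> omega

-- the no-'#' for-loop is "all non-'_' chars are decimal digits, and at least one"
lemma aLoop3_eq (cs : List Char) (acc : Bool) :
    aLoop3 cs acc =
      ((acc || decide ((cs.filter (· ≠ '_')) ≠ [])) &&
        (cs.filter (· ≠ '_')).all (fun c => decide ('0' ≤ c ∧ c ≤ '9'))) := by
  induction cs generalizing acc with
  | nil => simp [aLoop3]
  | cons c rest ih =>
    by_cases hc : c = '_'
    · simp [aLoop3, hc, ih]
    · by_cases hd : '0' ≤ c ∧ c ≤ '9'
      · simp [aLoop3, hc, hd, ih]
      · simp [aLoop3, hc, hd]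

-- the digit-part while loop, in the same shape
lemma aLoop2_eq (cs : List Char) (base : Int) (acc : Bool) :
    aLoop2 cs base acc =
      ((acc || decide ((cs.filter (· ≠ '_')) ≠ [])) &&
        (cs.filter (· ≠ '_')).all (fun c => decide (0 ≤ aDigit c ∧ aDigit c < base))) := by
  induction cs generalizing acc with
  | nil => simp [aLoop2]
  | cons c rest ih =>
    by_cases hc : c = '_'
    · simp [aLoop2, hc, ih]
    · by_cases hd : 0 ≤ aDigit c ∧ aDigit c < base
      · simp [aLoop2, hc, hd, ih]
      · simp [aLoop2, hc, hd]

lemma issubset_ofList (cs : List Char) (t : PySem.Set Char) :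
    (PySem.Set.ofList cs).issubset t = true ↔ ∀ x ∈ cs, x ∈ t := by
  rw [PySem.Set.issubset_iff]
  constructor
  · intro h x hx; exact h x ((PySem.Set.mem_ofList cs x).mpr hx)
  · intro h x hx; exact h x ((PySem.Set.mem_ofList cs x).mp hx)

lemma diff_isEmpty (cs : List Char) :
    (PySem.Set.diff (PySem.Set.ofList cs) (PySem.Set.ofList ['_'])).isEmpty = true ↔
      ∀ x ∈ cs, x = '_' := by
  unfold PySem.Set.diff
  rw [List.isEmpty_iff, List.filter_eq_nil_iff]
  constructor
  · intro h x hx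
    have := h x ((PySem.Set.mem_ofList cs x).mpr hx)
    simp [PySem.Set.contains, PySem.Set.ofList, PySem.Set.add, PySem.Set.empty] at this
    exact this
  · intro h x hx
    have hx' := h x ((PySem.Set.mem_ofList cs x).mp hx)
    simp [PySem.Set.contains, PySem.Set.ofList, PySem.Set.add, PySem.Set.empty, hx']

lemma mem_bDec_iff (c : Char) : c ∈ bDec ↔ (c = '_' ∨ (48 ≤ c.toNat ∧ c.toNat ≤ 57)) := by
  rw [bDec, PySem.Set.mem_ofList]
  simp [char_eq_iff]
  omega

lemma mem_lower_take (base : Int) (h2 : 2 ≤ base) (h16 : base ≤ 16) (c : Char) :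
    c ∈ List.take base.toNat bLower ↔
      ((48 ≤ c.toNat ∧ c.toNat ≤ 57 ∧ (c.toNat : Int) - 48 < base) ∨
       (97 ≤ c.toNat ∧ c.toNat ≤ 102 ∧ (c.toNat : Int) - 87 < base)) := by
  interval_cases base <;> (simp [bLower, char_eq_iff]; omega)

lemma mem_upper_take (base : Int) (h2 : 2 ≤ base) (h16 : base ≤ 16) (c : Char) :
    c ∈ List.take base.toNat bUpper ↔
      ((48 ≤ c.toNat ∧ c.toNat ≤ 57 ∧ (c.toNat : Int) - 48 < base) ∨
       (65 ≤ c.toNat ∧ c.toNat ≤ 70 ∧ (c.toNat : Int) - 55 < base)) := by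
  interval_cases base <;> (simp [bUpper, char_eq_iff]; omega)

lemma mem_allowed (base : Int) (h2 : 2 ≤ base) (h16 : base ≤ 16) (c : Char) :
    c ∈ PySem.Set.union (PySem.Set.union
          (PySem.Set.ofList (PySem.List.slice bLower none (some base)))
          (PySem.Set.ofList (PySem.List.slice bUpper none (some base))))
          (PySem.Set.ofList ['_']) ↔
      (c = '_' ∨ (0 ≤ aDigit c ∧ aDigit c < base)) := by
  rw [PySem.Set.mem_union, PySem.Set.mem_union, PySem.Set.mem_ofList, PySem.Set.mem_ofList,
    PySem.Set.mem_ofList, PySem.List.slice_to bLower (by omega : (0:Int) ≤ base),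
    PySem.List.slice_to bUpper (by omega : (0:Int) ≤ base),
    mem_lower_take base h2 h16 c, mem_upper_take base h2 h16 c, aDigit_iff base c]
  simp only [List.mem_singleton]
  tauto

-- the base fold from a nonnegative accumulator over decimal digits never shrinks
lemma foldl_ge (cs : List Char) (b : Int) (hb : 0 ≤ b)
    (h : ∀ c ∈ cs, 48 ≤ c.toNat ∧ c.toNat ≤ 57) :
    b ≤ cs.foldl bf b := by
  induction cs generalizing b with
  | nil => simp
  | cons c rest ih =>
    have hc := h c (by simp)
    have step : b ≤ bf b c := by unfold bf; omega
    calc b ≤ bf b c := step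
      _ ≤ _ := by
        simpa using ih (bf b c) (by unfold bf at step ⊢; omega)
          (fun x hx => h x (by simp [hx]))

-- leading zeros contribute nothing to the accumulated value
lemma foldl_dropZeros (ds : List Char) :
    ds.foldl bf 0 = (ds.dropWhile (· == '0')).foldl bf 0 := by
  induction ds with
  | nil => rfl
  | cons c rest ih =>
    by_cases hc : c = '0'
    · subst hc
      have : bf 0 '0' = 0 := by decide
      simp [List.foldl_cons, this, ih]
    · simp [hc]

lemma head_dropZeros (ds : List Char) :
    ∀ c ∈ (ds.dropWhile (· == '0')).head?, c ≠ '0' := by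
  induction ds with
  | nil => simp
  | cons c rest ih =>
    by_cases hc : c = '0'
    · simpa [hc] using ih
    · simp [hc]

-- the lookup table recognises exactly the canonical strings of the values 2..16
lemma table_spec (ds : List Char) (hdec : ∀ c ∈ ds, 48 ≤ c.toNat ∧ c.toNat ≤ 57)
    (hz : ∀ c ∈ ds.head?, c ≠ '0') :
    bBases.get? ds =
      if 2 ≤ ds.foldl bf 0 ∧ ds.foldl bf 0 ≤ 16 then some (ds.foldl bf 0) else none := by
  match ds with
  | [] =>
    rw [if_neg (by norm_num)]
    decide
  | [c] =>
    have h1 : 48 ≤ c.toNat ∧ c.toNat ≤ 57 := hdec c (by simp)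
    have h0 : c ≠ '0' := hz c (by simp)
    have h49 : 49 ≤ c.toNat := by
      by_contra hlt
      have h48 : c.toNat = 48 := by omega
      exact h0 (char_eq_of_toNat c '0' (by rw [h48]; decide))
    have h57 := h1.2
    interval_cases h : c.toNat
    · rw [char_eq_of_toNat c '1' (by rw [h]; decide)]; decide
    · rw [char_eq_of_toNat c '2' (by rw [h]; decide)]; decide
    · rw [char_eq_of_toNat c '3' (by rw [h]; decide)]; decide
    · rw [char_eq_of_toNat c '4' (by rw [h]; decide)]; decide
    · rw [char_eq_of_toNat c '5' (by rw [h]; decide)]; decide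
    · rw [char_eq_of_toNat c '6' (by rw [h]; decide)]; decide
    · rw [char_eq_of_toNat c '7' (by rw [h]; decide)]; decide
    · rw [char_eq_of_toNat c '8' (by rw [h]; decide)]; decide
    · rw [char_eq_of_toNat c '9' (by rw [h]; decide)]; decide
  | [c, d] =>
    have hc : 48 ≤ c.toNat ∧ c.toNat ≤ 57 := hdec c (by simp)
    have hd : 48 ≤ d.toNat ∧ d.toNat ≤ 57 := hdec d (by simp)
    have h0 : c ≠ '0' := hz c (by simp)
    have h49 : 49 ≤ c.toNat := by
      by_contra hlt
      have h48 : c.toNat = 48 := by omega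
      exact h0 (char_eq_of_toNat c '0' (by rw [h48]; decide))
    by_cases h1 : c.toNat = 49
    · rw [char_eq_of_toNat c '1' (by rw [h1]; decide)]
      have hd48 := hd.1
      have hd57 := hd.2
      interval_cases h : d.toNat
      · rw [char_eq_of_toNat d '0' (by rw [h]; decide)]; decide
      · rw [char_eq_of_toNat d '1' (by rw [h]; decide)]; decide
      · rw [char_eq_of_toNat d '2' (by rw [h]; decide)]; decide
      · rw [char_eq_of_toNat d '3' (by rw [h]; decide)]; decide
      · rw [char_eq_of_toNat d '4' (by rw [h]; decide)]; decide
      · rw [char_eq_of_toNat d '5' (by rw [h]; decide)]; decide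
      · rw [char_eq_of_toNat d '6' (by rw [h]; decide)]; decide
      · rw [char_eq_of_toNat d '7' (by rw [h]; decide)]; decide
      · rw [char_eq_of_toNat d '8' (by rw [h]; decide)]; decide
      · rw [char_eq_of_toNat d '9' (by rw [h]; decide)]; decide
    · have hc1 : ('1' == c) = false := beq_eq_false_iff_ne.mpr (fun e => h1 (by rw [← e]; decide))
      rw [if_neg (by simp [List.foldl_cons, bf]; omega)]
      simp [bBases, PySem.Dict.get?, List.find?, hc1]
  | c :: d :: e :: rest =>
    have hc : 48 ≤ c.toNat ∧ c.toNat ≤ 57 := hdec c (by simp)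
    have hd : 48 ≤ d.toNat ∧ d.toNat ≤ 57 := hdec d (by simp)
    have he : 48 ≤ e.toNat ∧ e.toNat ≤ 57 := hdec e (by simp)
    have h0 : c ≠ '0' := hz c (by simp)
    have h49 : 49 ≤ c.toNat := by
      by_contra hlt
      have h48 : c.toNat = 48 := by omega
      exact h0 (char_eq_of_toNat c '0' (by rw [h48]; decide))
    have hacc : (100 : Int) ≤ bf (bf (bf 0 c) d) e := by unfold bf; push_cast; omega
    have hge := foldl_ge rest (bf (bf (bf 0 c) d) e) (by omega)
      (fun x hx => hdec x (by simp [hx]))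
    rw [if_neg (by simp only [List.foldl_cons]; omega)]
    simp [bBases, PySem.Dict.get?, List.find?]

-- proof-only views of the two '#'-branches of A
def aHash (cs : List Char) (b : Int) : Bool :=
  match aLoop1 cs b with
  | none => false
  | some (suffix, base) =>
    if base < 2 ∨ 16 < base then false
    else aLoop2 ((suffix.drop 1).dropLast) base false

def mHash (cs : List Char) (b : Int) : Bool :=
  let digits := (cs.takeWhile (· ≠ '#')).filter (· ≠ '_')
  if ¬ (digits.all (fun c => decide ('0' ≤ c ∧ c ≤ '9')) = true) then false
  else
    let base := digits.foldl bf b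
    if base < 2 ∨ 16 < base then false
    else aLoop2 (((cs.dropWhile (· ≠ '#')).drop 1).dropLast) base false

lemma foldl_ge' (cs : List Char) (b : Int) (hb : 0 ≤ b)
    (h : cs.all (fun c => decide ('0' ≤ c ∧ c ≤ '9')) = true) :
    b ≤ cs.foldl bf b := by
  apply foldl_ge cs b hb
  intro x hx
  have := (List.all_eq_true.mp h) x hx
  simp [char_le_iff] at this
  exact this

lemma adaHash_eq (cs : List Char) (b : Int) (hb : 0 ≤ b) (h : '#' ∈ cs) :
    aHash cs b = mHash cs b := by
  induction cs generalizing b with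
  | nil => cases h
  | cons c rest ih =>
    by_cases hc : c = '#'
    · subst hc
      simp [aHash, mHash, aLoop1]
    · have hmem : '#' ∈ rest := by
        rcases List.mem_cons.1 h with h' | h'
        · exact absurd h'.symm hc
        · exact h'
      by_cases hb16 : b ≤ 16
      · by_cases hu : c = '_'
        · subst hu
          have l1 : aHash ('_' :: rest) b = aHash rest b := by
            simp [aHash, aLoop1, hb16]
          have r1 : mHash ('_' :: rest) b = mHash rest b := by
            simp [mHash]
          rw [l1, r1]; exact ih b hb hmem
        · by_cases hd : '0' ≤ c ∧ c ≤ '9'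
          · have h48 : 48 ≤ c.toNat := by
              have := hd.1; rw [char_le_iff] at this; exact this
            have hb' : 0 ≤ b * 10 + ((c.toNat : Int) - 48) := by omega
            have l2 : aHash (c :: rest) b = aHash rest (b * 10 + ((c.toNat : Int) - 48)) := by
              simp [aHash, aLoop1, hc, hb16, hu, hd]
            have r2 : mHash (c :: rest) b = mHash rest (b * 10 + ((c.toNat : Int) - 48)) := by
              simp [mHash, hc, hu, hd, bf]
            rw [l2, r2]; exact ih _ hb' hmem
          · have l3 : aHash (c :: rest) b = false := by
              simp [aHash, aLoop1, hc, hb16, hu, hd]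
            have r3 : mHash (c :: rest) b = false := by
              simp [mHash, hc, hu, hd]
            rw [l3, r3]
      · have l4 : aHash (c :: rest) b = false := by
          unfold aHash aLoop1
          rw [if_neg (by tauto)]
          exact if_pos (Or.inr (by omega))
        rw [l4]
        unfold mHash
        by_cases hall : (((c :: rest).takeWhile (· ≠ '#')).filter (· ≠ '_')).all
            (fun c => decide ('0' ≤ c ∧ c ≤ '9')) = true
        · have hge := foldl_ge' _ b hb hall
          rw [if_neg (not_not_intro hall)]
          exact (if_pos (Or.inr (by omega))).symm
        · rw [if_pos hall]

-- the no-'#' branch: A's scan equals B's set inclusions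
lemma plain_eq_set (cs : List Char) :
    aLoop3 cs false =
      ((PySem.Set.ofList cs).issubset bDec &&
        !(PySem.Set.diff (PySem.Set.ofList cs) (PySem.Set.ofList ['_'])).isEmpty) := by
  rw [aLoop3_eq, Bool.eq_iff_iff]
  simp only [Bool.and_eq_true, Bool.false_or, decide_eq_true_eq,
    List.all_eq_true, issubset_ofList, Bool.not_eq_eq_eq_not, Bool.not_true]
  rw [← Bool.not_eq_true, diff_isEmpty]
  constructor
  · rintro ⟨hne, hall⟩
    refine ⟨?_, ?_⟩
    · intro x hx
      rw [mem_bDec_iff]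
      by_cases hx' : x = '_'
      · exact Or.inl hx'
      · have := hall x (List.mem_filter.mpr ⟨hx, by simp [hx']⟩)
        simp [char_le_iff] at this
        exact Or.inr this
    · intro hallu
      exact hne (List.filter_eq_nil_iff.mpr (fun x hx => by simp [hallu x hx]))
  · rintro ⟨hsub, hnua⟩
    constructor
    · intro hnil
      exact hnua (fun x hx => by
        by_contra hxe
        have hmemf : x ∈ cs.filter (· ≠ '_') := List.mem_filter.mpr ⟨hx, by simp [hxe]⟩
        rw [hnil] at hmemf
        simp at hmemf)
    · intro x hx
      rcases List.mem_filter.mp hx with ⟨hxm, hxu⟩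
      have := (mem_bDec_iff x).mp (hsub x hxm)
      simp at hxu
      rcases this with h | h
      · exact absurd h hxu
      · simp [char_le_iff]; exact h

-- the digit-part scan equals B's set inclusion against the sliced alphabets
lemma scan_eq_set (body : List Char) (base : Int) (h2 : 2 ≤ base) (h16 : base ≤ 16) :
    aLoop2 body base false =
      ((PySem.Set.ofList body).issubset (PySem.Set.union (PySem.Set.union
          (PySem.Set.ofList (PySem.List.slice bLower none (some base)))
          (PySem.Set.ofList (PySem.List.slice bUpper none (some base))))
          (PySem.Set.ofList ['_'])) &&
        !(PySem.Set.diff (PySem.Set.ofList body) (PySem.Set.ofList ['_'])).isEmpty) := by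
  rw [aLoop2_eq, Bool.eq_iff_iff]
  simp only [Bool.and_eq_true, Bool.false_or, decide_eq_true_eq,
    List.all_eq_true, issubset_ofList, Bool.not_eq_eq_eq_not, Bool.not_true]
  rw [← Bool.not_eq_true, diff_isEmpty]
  constructor
  · rintro ⟨hne, hall⟩
    refine ⟨?_, ?_⟩
    · intro x hx
      rw [mem_allowed base h2 h16 x]
      by_cases hx' : x = '_'
      · exact Or.inl hx'
      · exact Or.inr (hall x (List.mem_filter.mpr ⟨hx, by simp [hx']⟩))
    · intro hallu
      exact hne (List.filter_eq_nil_iff.mpr (fun x hx => by simp [hallu x hx]))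
  · rintro ⟨hsub, hnua⟩
    constructor
    · intro hnil
      exact hnua (fun x hx => by
        by_contra hxe
        have hmemf : x ∈ body.filter (· ≠ '_') := List.mem_filter.mpr ⟨hx, by simp [hxe]⟩
        rw [hnil] at hmemf
        simp at hmemf)
    · intro x hx
      rcases List.mem_filter.mp hx with ⟨hxm, hxu⟩
      have := (mem_allowed base h2 h16 x).mp (hsub x hxm)
      simp at hxu
      rcases this with h | h
      · exact absurd h hxu
      · exact h

-- ===== VERDICT (by name: the statement is the Claim_ definition above) =====
theorem adaNumber_spec : Claim_equal_adaNumber := by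
  intro line _ hpre
  unfold Spec_adaNumber adaNumber adaNumber_alt
  cases hcs : line.toList.getLast? with
  | none => rfl
  | some last =>
    dsimp only
    by_cases hl : last = '#'
    · subst hl
      rw [if_pos rfl, if_neg (not_not_intro rfl)]
      have hmem : '#' ∈ line.toList := List.mem_of_getLast? hcs
      have hA : (match aLoop1 line.toList 0 with
        | none => false
        | some (suffix, base) =>
          if base < 2 ∨ 16 < base then false
          else aLoop2 ((suffix.drop 1).dropLast) base false) = aHash line.toList 0 := rfl
      rw [hA, adaHash_eq line.toList 0 le_rfl hmem]
      unfold mHash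
      set cs := line.toList with hcsdef
      set head := cs.takeWhile (· ≠ '#') with hhead
      set digits := head.filter (· ≠ '_') with hdigits
      set body := ((cs.dropWhile (· ≠ '#')).drop 1).dropLast with hbody
      by_cases hsub : (PySem.Set.ofList head).issubset bDec = true
      · rw [if_neg (not_not_intro hsub)]
        have hdec : digits.all (fun c => decide ('0' ≤ c ∧ c ≤ '9')) = true := by
          rw [List.all_eq_true]
          intro x hx
          rcases List.mem_filter.mp hx with ⟨hxm, hxu⟩
          have := (mem_bDec_iff x).mp ((issubset_ofList head bDec).mp hsub x hxm)
          simp at hxu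
          rcases this with h | h
          · exact absurd h hxu
          · simp [char_le_iff]; exact h
        rw [if_neg (not_not_intro hdec)]
        have hdigs : ∀ c ∈ digits.dropWhile (· == '0'), 48 ≤ c.toNat ∧ c.toNat ≤ 57 := by
          intro x hx
          have hxm : x ∈ digits := (List.dropWhile_sublist _).mem hx
          have := (List.all_eq_true.mp hdec) x hxm
          simp [char_le_iff] at this
          exact this
        rw [table_spec _ hdigs (head_dropZeros digits), ← foldl_dropZeros digits]
        by_cases hv : 2 ≤ digits.foldl bf 0 ∧ digits.foldl bf 0 ≤ 16
        · rw [if_pos hv]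
          dsimp only
          rw [if_neg (by omega)]
          exact scan_eq_set body _ hv.1 hv.2
        · rw [if_neg hv, if_pos (by omega)]
      · rw [if_pos hsub]
        have : ¬ (digits.all (fun c => decide ('0' ≤ c ∧ c ≤ '9')) = true) := by
          intro hdec
          apply hsub
          rw [issubset_ofList]
          intro x hx
          rw [mem_bDec_iff]
          by_cases hx' : x = '_'
          · exact Or.inl hx'
          · have := (List.all_eq_true.mp hdec) x (List.mem_filter.mpr ⟨hx, by simp [hx']⟩)
            simp [char_le_iff] at this
            exact Or.inr this
        rw [if_pos this]
    · rw [if_neg hl, if_pos hl]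
      exact plain_eq_set line.toList
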